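-- pv_equiv track=rewrite | github.com/aoe870/StockInsight | src/core/formula_engine.py | _find_comparison_operator
-- ===== SOURCE A (Python) =====
-- def _find_comparison_operator(expr: str, op: str) -> int:
--     """找到不在括号内的比较运算符位置（从左往右）"""
--     depth = 0
--     i = 0
--     while i < len(expr):
--         c = expr[i]
--         if c == '(':
--             depth += 1
--         elif c == ')':
--             depth -= 1
--         elif depth == 0:
--             # 检查是否匹配运算符
--             if expr[i:i+len(op)] == op:
--                 # 对于 > 和 <，需要确保不是 >= 或 <=
--                 if op == '>' and i + 1 < len(expr) and expr[i + 1] == '=':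
--                     i += 1
--                     continue
--                 if op == '<' and i + 1 < len(expr) and expr[i + 1] == '=':
--                     i += 1
--                     continue
--                 if op == '=' and i > 0 and expr[i - 1] in ['>', '<', '!']:
--                     i += 1
--                     continue
--                 return i
--         i += 1
--     return -1
-- ===== SOURCE B (Python) =====
-- def _find_comparison_operator(expr: str, op: str) -> int:
--     """找到不在括号内的比较运算符位置（从左往右）"""
--     start = 0
--     while True:
--         i = expr.find(op, start)
--         if i == -1:
--             return -1
--         if expr.count('(', 0, i) - expr.count(')', 0, i) == 0:
--             if op == '>' and i + 1 < len(expr) and expr[i + 1] == '=':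
--                 pass
--             elif op == '<' and i + 1 < len(expr) and expr[i + 1] == '=':
--                 pass
--             elif op == '=' and i > 0 and expr[i - 1] in ['>', '<', '!']:
--                 pass
--             else:
--                 return i
--         start = i + 1
-- ===== Notes on version B (the rewrite author's own statement) =====
-- stated objective: faster
-- what changed: Replaces the single per-character Python scan with a running depth counter by a repeated str.find over candidate occurrences whose depth is recomputed from prefix str.count parenthesis counts, delegating the scanning to C-level string primitives.
-- outside the precondition, e.g. on _find_comparison_operator('(a)', ''): A returns -1, B returns 0; on _find_comparison_operator('(a)', '('): A returns -1, B returns 0; on _find_comparison_operator('a)b', ')'): A returns -1, B returns 1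
import Mathlib
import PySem

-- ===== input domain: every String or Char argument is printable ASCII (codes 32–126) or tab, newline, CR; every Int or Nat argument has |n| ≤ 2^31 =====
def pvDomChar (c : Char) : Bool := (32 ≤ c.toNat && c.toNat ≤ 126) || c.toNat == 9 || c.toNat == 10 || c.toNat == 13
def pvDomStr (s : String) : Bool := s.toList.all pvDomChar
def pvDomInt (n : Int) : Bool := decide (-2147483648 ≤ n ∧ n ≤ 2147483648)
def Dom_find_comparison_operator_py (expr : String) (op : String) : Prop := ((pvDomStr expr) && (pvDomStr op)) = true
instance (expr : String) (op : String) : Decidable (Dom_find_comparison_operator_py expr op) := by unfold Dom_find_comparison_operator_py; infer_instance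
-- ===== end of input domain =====

-- B replaces A's single stateful scan (running parenthesis depth) by a repeated str.find over candidate
-- occurrences, recomputing each candidate's depth from prefix parenthesis counts (objective: alternative).

-- ===== PORT A =====
-- literal port of A's while-loop: i counts up by 1 each iteration, depth is the running parenthesis depth;
-- expr[i:i+len(op)] == op is ported as (cs.drop i).take op.toList.length = op.toList — exact, since 0 ≤ i.
def pvLoopA (cs : List Char) (op : String) (i : Nat) (depth : Int) : Int :=
  if hlt : i < cs.length then
    if cs.getD i ' ' = '(' then pvLoopA cs op (i + 1) (depth + 1)
    else if cs.getD i ' ' = ')' then pvLoopA cs op (i + 1) (depth - 1)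
    else if depth = 0 then
      if (cs.drop i).take op.toList.length = op.toList then
        if op = ">" ∧ i + 1 < cs.length ∧ cs.getD (i + 1) ' ' = '=' then pvLoopA cs op (i + 1) depth
        else if op = "<" ∧ i + 1 < cs.length ∧ cs.getD (i + 1) ' ' = '=' then pvLoopA cs op (i + 1) depth
        else if op = "=" ∧ 0 < i ∧ cs.getD (i - 1) ' ' ∈ (['>', '<', '!'] : List Char) then pvLoopA cs op (i + 1) depth
        else (i : Int)
      else pvLoopA cs op (i + 1) depth
    else pvLoopA cs op (i + 1) depth
  else -1
termination_by cs.length - i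

def find_comparison_operator_py (expr : String) (op : String) : Int :=
  pvLoopA expr.toList op 0 0

-- ===== PORT B =====
-- Two B-side facts cited by the port's termination proof: a start index past the end finds nothing,
-- and a found index is ≥ the start index.
theorem pvFindFrom_oob (cs sub : List Char) (k : Nat) (hk : cs.length < k) :
    PySem.Chars.findFrom cs sub (k : Int) = -1 := by
  simp only [PySem.Chars.findFrom]
  split_ifs with h1 h2 h3 h4 h5 <;> first | rfl | omega

theorem pvFindFrom_ge (cs sub : List Char) (k : Nat)
    (h : PySem.Chars.findFrom cs sub (k : Int) ≠ -1) :
    k ≤ (PySem.Chars.findFrom cs sub (k : Int)).toNat := by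
  by_cases hk : k ≤ cs.length
  · have := (PySem.Chars.findFrom_natCast_spec cs sub k hk h).1
    omega
  · exact absurd (pvFindFrom_oob cs sub k (by omega)) h

-- literal port of B's while-loop: i = expr.find(op, start) is PySem.Chars.findFrom (-1 = not found);
-- expr.count('(', 0, i) is ported as (cs.take i).count '(' — exact: counting a one-character substring
-- in the slice [0:i] with 0 ≤ i is the character count of take i.
def pvLoopB (cs : List Char) (op : String) (start : Nat) : Int :=
  if hf : PySem.Chars.findFrom cs op.toList (start : Int) = -1 then -1
  else
    have hge := pvFindFrom_ge cs op.toList start hf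
    let j := (PySem.Chars.findFrom cs op.toList (start : Int)).toNat
    if ((cs.take j).count '(' : Int) - ((cs.take j).count ')' : Int) = 0 then
      if op = ">" ∧ j + 1 < cs.length ∧ cs.getD (j + 1) ' ' = '=' then pvLoopB cs op (j + 1)
      else if op = "<" ∧ j + 1 < cs.length ∧ cs.getD (j + 1) ' ' = '=' then pvLoopB cs op (j + 1)
      else if op = "=" ∧ 0 < j ∧ cs.getD (j - 1) ' ' ∈ (['>', '<', '!'] : List Char) then pvLoopB cs op (j + 1)
      else (j : Int)
    else pvLoopB cs op (j + 1)
termination_by cs.length + 1 - start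
decreasing_by
  all_goals
    have hge := pvFindFrom_ge cs op.toList start hf
    have hle : start ≤ cs.length := by
      by_contra hgt
      exact hf (pvFindFrom_oob cs op.toList start (by omega))
    have hlen := PySem.Chars.find_le_length (cs.drop start) op.toList
    have hval := PySem.Chars.findFrom_natCast cs op.toList start hle
    rw [hval] at hge ⊢ <;> split_ifs at hge ⊢ <;> simp_all <;> omega

def find_comparison_operator_py_alt (expr : String) (op : String) : Int :=
  pvLoopB expr.toList op 0

-- ===== PRECONDITION & SPEC =====
-- Pre_ excludes the empty op and ops whose first character is a parenthesis: these are not operator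
-- strings, and there A's value (-1, or for the empty op the index of the first balanced non-paren
-- character) is an artefact of its scan never testing a match at a parenthesis character; B naturally
-- differs there.
def Pre_find_comparison_operator_py (expr : String) (op : String) : Prop :=
  op.toList ≠ [] ∧ op.toList.headD ' ' ∉ (['(', ')'] : List Char)
instance (expr : String) (op : String) : Decidable (Pre_find_comparison_operator_py expr op) := by
  unfold Pre_find_comparison_operator_py; infer_instance

def pvWitness_find_comparison_operator_py : String × String := ("(a>b)>c", ">")

def Spec_find_comparison_operator_py (expr : String) (op : String) (out : Int) : Prop :=
  out = find_comparison_operator_py_alt expr op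
instance (expr : String) (op : String) (out : Int) : Decidable (Spec_find_comparison_operator_py expr op out) := by
  unfold Spec_find_comparison_operator_py; infer_instance

-- ===== CLAIM (what is proved, stated in full; the proofs are below) =====
def Claim_equal_find_comparison_operator_py : Prop := ∀ (expr : String) (op : String), Dom_find_comparison_operator_py expr op → Pre_find_comparison_operator_py expr op → Spec_find_comparison_operator_py expr op (find_comparison_operator_py expr op)

-- ===== LEMMAS AND PROOFS =====

theorem pvInfix_of_prefix_drop (cs sub : List Char) (m k : Nat) (hkm : k ≤ m)
    (h : sub <+: cs.drop m) : sub <:+: cs.drop k := by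
  have h1 : cs.drop m <:+ cs.drop k := by
    have he : cs.drop m = (cs.drop k).drop (m - k) := by rw [List.drop_drop]; congr 1; omega
    rw [he]
    exact List.drop_suffix _ _
  exact h.isInfix.trans h1.isInfix

theorem pvFindFrom_hit (cs sub : List Char) (k : Nat) (hk : k ≤ cs.length)
    (hm : sub <+: cs.drop k) :
    PySem.Chars.findFrom cs sub (k : Int) = (k : Int) := by
  have hne : PySem.Chars.findFrom cs sub (k : Int) ≠ -1 := by
    rw [Ne, PySem.Chars.findFrom_natCast_eq_neg_one_iff cs sub k hk]
    exact not_not_intro hm.isInfix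
  obtain ⟨h1, h2, h3⟩ := PySem.Chars.findFrom_natCast_spec cs sub k hk hne
  by_cases hgt : k < (PySem.Chars.findFrom cs sub (k : Int)).toNat
  · exact absurd hm (h3 k le_rfl hgt)
  · omega

theorem pvFindFrom_step (cs sub : List Char) (k : Nat) (hk : k ≤ cs.length)
    (hm : ¬ sub <+: cs.drop k) :
    PySem.Chars.findFrom cs sub (k : Int) = PySem.Chars.findFrom cs sub ((k + 1 : Nat) : Int) := by
  by_cases hk1 : k + 1 ≤ cs.length
  · by_cases hne : PySem.Chars.findFrom cs sub ((k + 1 : Nat) : Int) = -1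
    · rw [hne, PySem.Chars.findFrom_natCast_eq_neg_one_iff cs sub k hk]
      rw [PySem.Chars.findFrom_natCast_eq_neg_one_iff cs sub (k+1) hk1] at hne
      intro hinf
      -- infix of drop k: some j with prefix at k + j; j ≠ 0, so infix of drop (k+1)
      rw [← PySem.Chars.isIn_iff_infix, ← PySem.Chars.exists_prefix_drop_iff_isIn] at hinf
      obtain ⟨j, hj⟩ := hinf
      rw [List.drop_drop] at hj
      rcases Nat.eq_zero_or_pos j with rfl | hpos
      · exact hm (by simpa using hj)
      · exact hne (pvInfix_of_prefix_drop cs sub (k + j) (k+1) (by omega) hj)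
    · obtain ⟨h1, h2, h3⟩ := PySem.Chars.findFrom_natCast_spec cs sub (k+1) hk1 hne
      set v := (PySem.Chars.findFrom cs sub ((k + 1 : Nat) : Int)).toNat with hv
      have hne0 : PySem.Chars.findFrom cs sub (k : Int) ≠ -1 := by
        rw [Ne, PySem.Chars.findFrom_natCast_eq_neg_one_iff cs sub k hk]
        exact not_not_intro (pvInfix_of_prefix_drop cs sub v k (by omega) h2)
      obtain ⟨g1, g2, g3⟩ := PySem.Chars.findFrom_natCast_spec cs sub k hk hne0
      set w := (PySem.Chars.findFrom cs sub (k : Int)).toNat with hw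
      have hwk : w ≠ k := fun he => hm (he ▸ g2)
      have hwv : w = v := by
        have l1 : ¬ w < v := fun hlt => h3 w (by omega) hlt g2
        have l2 : ¬ v < w := fun hlt => g3 v (by omega) hlt h2
        omega
      omega
  · have hk' : k = cs.length := by omega
    rw [pvFindFrom_oob cs sub (k+1) (by omega)]
    rw [PySem.Chars.findFrom_natCast_eq_neg_one_iff cs sub k hk]
    subst hk'
    simp only [List.drop_length]
    intro hinf
    have hsub : sub = [] := List.eq_nil_of_infix_nil hinf
    exact hm (hsub ▸ List.nil_prefix)

theorem pvLoopB_congr (cs : List Char) (op : String) (k : Nat)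
    (h : PySem.Chars.findFrom cs op.toList (k : Int) = PySem.Chars.findFrom cs op.toList ((k + 1 : Nat) : Int)) :
    pvLoopB cs op k = pvLoopB cs op (k + 1) := by
  conv_lhs => rw [pvLoopB.eq_def]
  conv_rhs => rw [pvLoopB.eq_def]
  simp only [h]

theorem pvLoop_eq (cs : List Char) (op : String) (h0 : op.toList ≠ [])
    (hpar : op.toList.headD ' ' ∉ (['(', ')'] : List Char)) (i : Nat) :
    pvLoopA cs op i (((cs.take i).count '(' : Int) - ((cs.take i).count ')' : Int)) = pvLoopB cs op i := by
  by_cases hlt : i < cs.length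
  case neg =>
    rw [pvLoopA.eq_def, dif_neg hlt, pvLoopB.eq_def, dif_pos]
    by_cases hk : i ≤ cs.length
    · have hi : i = cs.length := by omega
      rw [PySem.Chars.findFrom_natCast_eq_neg_one_iff cs op.toList i hk, hi]
      simp only [List.drop_length]
      intro hinf
      exact h0 (List.eq_nil_of_infix_nil hinf)
    · exact pvFindFrom_oob cs op.toList i (by omega)
  case pos =>
    have hgetD : cs.getD i ' ' = cs[i] := List.getD_eq_getElem cs ' ' hlt
    have hdropc : cs.drop i = cs[i] :: cs.drop (i + 1) := List.drop_eq_getElem_cons hlt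
    have htake : cs.take (i + 1) = cs.take i ++ [cs[i]] := by
      rw [List.take_succ, List.getElem?_eq_getElem hlt]; rfl
    have hhead : op.toList <+: cs.drop i → cs[i] = op.toList.headD ' ' := by
      intro hp
      obtain ⟨c, t, hct⟩ : ∃ c t, op.toList = c :: t := by
        cases hop : op.toList with
        | nil => exact absurd hop h0
        | cons c t => exact ⟨c, t, rfl⟩
      rw [hct, hdropc] at hp
      obtain ⟨r, hr⟩ := hp
      rw [hct]
      simp only [List.cons_append] at hr
      simp [← List.head_eq_of_cons_eq hr]
    by_cases hc1 : cs.getD i ' ' = '('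
    · have hnm : ¬ op.toList <+: cs.drop i := by
        intro hp
        have hh := hhead hp
        rw [hgetD] at hc1
        rw [hc1] at hh
        apply hpar
        rw [← hh]
        decide
      have harg : ((cs.take i).count '(' : Int) - ((cs.take i).count ')' : Int) + 1
          = ((cs.take (i + 1)).count '(' : Int) - ((cs.take (i + 1)).count ')' : Int) := by
        rw [hgetD] at hc1
        rw [htake]
        simp [List.count_append, hc1]
        push_cast
        ring
      rw [pvLoopA.eq_def, dif_pos hlt, if_pos hc1, harg,
          pvLoop_eq cs op h0 hpar (i + 1)]
      exact (pvLoopB_congr cs op i (pvFindFrom_step cs op.toList i (by omega) hnm)).symm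
    · by_cases hc2 : cs.getD i ' ' = ')'
      · have hnm : ¬ op.toList <+: cs.drop i := by
          intro hp
          have hh := hhead hp
          rw [hgetD] at hc2
          rw [hc2] at hh
          apply hpar
          rw [← hh]
          decide
        have harg : ((cs.take i).count '(' : Int) - ((cs.take i).count ')' : Int) - 1
            = ((cs.take (i + 1)).count '(' : Int) - ((cs.take (i + 1)).count ')' : Int) := by
          rw [hgetD] at hc2
          rw [htake]
          simp [List.count_append, hc2]
          push_cast
          ring
        rw [pvLoopA.eq_def, dif_pos hlt, if_neg hc1, if_pos hc2, harg,
            pvLoop_eq cs op h0 hpar (i + 1)]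
        exact (pvLoopB_congr cs op i (pvFindFrom_step cs op.toList i (by omega) hnm)).symm
      · have harg : ((cs.take i).count '(' : Int) - ((cs.take i).count ')' : Int)
            = ((cs.take (i + 1)).count '(' : Int) - ((cs.take (i + 1)).count ')' : Int) := by
          rw [hgetD] at hc1 hc2
          rw [htake]
          simp only [List.count_append, List.count_singleton, beq_iff_eq]
          rw [if_neg hc1, if_neg hc2]
          push_cast
          ring
        by_cases hm : (cs.drop i).take op.toList.length = op.toList
        · have hpre : op.toList <+: cs.drop i := List.prefix_iff_eq_take.2 hm.symm
          have hhit := pvFindFrom_hit cs op.toList i (by omega) hpre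
          rw [pvLoopA.eq_def, dif_pos hlt, if_neg hc1, if_neg hc2, if_pos hm]
          rw [pvLoopB.eq_def]
          simp only [hhit, Int.toNat_natCast]
          rw [dif_neg (by omega)]
          split_ifs with hd he1 he2 he3 <;>
            first
              | rfl
              | (rw [harg]; exact pvLoop_eq cs op h0 hpar (i + 1))
        · have hnm : ¬ op.toList <+: cs.drop i := fun hp => hm (List.prefix_iff_eq_take.1 hp).symm
          rw [pvLoopA.eq_def, dif_pos hlt, if_neg hc1, if_neg hc2, if_neg hm, ite_self,
              harg, pvLoop_eq cs op h0 hpar (i + 1)]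
          exact (pvLoopB_congr cs op i (pvFindFrom_step cs op.toList i (by omega) hnm)).symm
termination_by cs.length + 1 - i
decreasing_by all_goals omega

-- ===== VERDICT (by name: the statement is the Claim_ definition above) =====
theorem find_comparison_operator_py_spec : Claim_equal_find_comparison_operator_py := by
  intro expr op _ hpre
  unfold Spec_find_comparison_operator_py find_comparison_operator_py find_comparison_operator_py_alt
  have h := pvLoop_eq expr.toList op hpre.1 hpre.2 0
  simpa using h
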